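-- pv_equiv track=rewrite | github.com/Xavier-hm/Inform-tica-I | Algortimos Python U3/Ejercicios en clase/codigos/ejercicio4.py | num_repetidos
-- ===== SOURCE A (Python) =====
-- def num_repetidos(linea):
--     num_repetidos='-' #-054-4-224-
--     repetidos=False
--     aux=''
--     for index in linea:
--         #range(len(linea)): # 0-len(linea)
--         #caracter=linea[index]
--         caracter=index
--         if caracter!='-':
--             aux=aux+caracter
--         if caracter=='-' or index==len(linea)-1:
--             if '-'+aux+'-' in num_repetidos:  #-4-   -234-44555-6
--                 repetidos=True
--                 break
--             num_repetidos=num_repetidos+aux+'-'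
--             aux=''
--     return repetidos
-- ===== SOURCE B (Python) =====
-- def num_repetidos(linea):
--     # A segment counts only when terminated by '-' (split keeps a final
--     # unterminated piece; drop it), then detect a repeat with a seen-set.
--     seen = set()
--     for seg in linea.split('-')[:-1]:
--         if seg in seen:
--             return True
--         seen.add(seg)
--     return False
-- ===== Notes on version B (the rewrite author's own statement) =====
-- stated objective: faster
-- what changed: Replaces the char-by-char accumulator with a growing-string substring test by one split('-') plus a hash-set scan over the '-'-terminated segments (the unterminated last piece dropped, as A never checks it).
import Mathlib
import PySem

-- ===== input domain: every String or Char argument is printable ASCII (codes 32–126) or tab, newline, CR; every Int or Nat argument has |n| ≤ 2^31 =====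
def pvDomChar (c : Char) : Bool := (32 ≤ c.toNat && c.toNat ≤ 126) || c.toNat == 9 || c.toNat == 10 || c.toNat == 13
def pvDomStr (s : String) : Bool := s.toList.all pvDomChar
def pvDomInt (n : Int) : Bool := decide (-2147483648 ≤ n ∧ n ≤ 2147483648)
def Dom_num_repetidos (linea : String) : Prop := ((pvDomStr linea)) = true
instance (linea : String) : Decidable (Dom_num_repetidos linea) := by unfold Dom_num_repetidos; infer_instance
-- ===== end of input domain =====

-- B replaces A's char-by-char accumulator + substring test on a growing string by
-- split('-') plus one seen-set scan over the '-'-terminated segments (faster).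

-- ===== PORT A =====
-- the loop: state = (num_repetidos accumulator string, aux); 'break' returns true,
-- falling off the end returns false (repetidos is only ever set right before break).
-- Python's 'or index==len(linea)-1' compares a str with an int: always False in
-- Python 3, so that disjunct is omitted (it can never fire).
def numRepLoop : List Char → List Char → List Char → Bool
  | [], _num_rep, _aux => false
  | caracter :: rest, num_rep, aux =>
      let aux' := if caracter ≠ '-' then aux ++ [caracter] else aux
      if caracter = '-' then
        if PySem.Chars.isIn ('-' :: (aux' ++ ['-'])) num_rep then true
        else numRepLoop rest (num_rep ++ aux' ++ ['-']) []
      else numRepLoop rest num_rep aux'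

def num_repetidos (linea : String) : Bool := numRepLoop linea.toList ['-'] []

-- ===== PORT B =====
-- the for-loop over segs with the seen set; early 'return True' on a repeat
def bLoop : List (List Char) → PySem.Set (List Char) → Bool
  | [], _seen => false
  | seg :: rest, seen =>
      if PySem.Set.contains seen seg then true
      else bLoop rest (PySem.Set.add seen seg)

-- linea.split('-') with the non-empty literal separator is exactly Chars.splitOn;
-- [:-1] is PySem.List.slice none (some (-1))
def num_repetidos_alt (linea : String) : Bool :=
  bLoop (PySem.List.slice (PySem.Chars.splitOn linea.toList ['-']) none (some (-1)))
    PySem.Set.empty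

-- ===== PRECONDITION & SPEC =====
def Spec_num_repetidos (linea : String) (out : Bool) : Prop := out = num_repetidos_alt linea
instance (linea : String) (out : Bool) : Decidable (Spec_num_repetidos linea out) := by unfold Spec_num_repetidos; infer_instance

-- ===== CLAIM (what is proved, stated in full; the proofs are below) =====
def Claim_equal_num_repetidos : Prop := ∀ (linea : String), Dom_num_repetidos linea → Spec_num_repetidos linea (num_repetidos linea)

-- ===== LEMMAS AND PROOFS =====

-- spec of splitOn with a single-char separator, plain structural recursion
def splitSpec : List Char → List Char → List (List Char)
  | [], cur => [cur]
  | c :: rest, cur => if c = '-' then cur :: splitSpec rest [] else splitSpec rest (cur ++ [c])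

-- the '-'-terminated segments of aux ++ cs (what both loops effectively scan)
def segsT : List Char → List Char → List (List Char)
  | [], _aux => []
  | c :: rest, aux => if c = '-' then aux :: segsT rest [] else segsT rest (aux ++ [c])

theorem splitSpec_ne_nil (l cur : List Char) : splitSpec l cur ≠ [] := by
  induction l generalizing cur with
  | nil => simp [splitSpec]
  | cons c rest ih =>
      simp only [splitSpec]
      split_ifs <;> simp [ih]

theorem dropLast_splitSpec (l cur : List Char) :
    (splitSpec l cur).dropLast = segsT l cur := by
  induction l generalizing cur with
  | nil => simp [splitSpec, segsT]
  | cons c rest ih =>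
      simp only [splitSpec, segsT]
      split_ifs with h
      · rw [List.dropLast_cons_of_ne_nil (splitSpec_ne_nil rest []), ih]
      · exact ih _

theorem go_eq (fuel : Nat) (l cur : List Char) (acc' : List (List Char))
    (h : l.length < fuel) :
    PySem.Chars.splitOn.go ['-'] fuel l cur acc' = acc'.reverse ++ splitSpec l cur.reverse := by
  induction fuel generalizing l cur acc' with
  | zero => omega
  | succ fuel ih =>
      cases l with
      | nil => simp [PySem.Chars.splitOn.go, splitSpec]
      | cons c rest =>
          simp only [PySem.Chars.splitOn.go, List.isPrefixOf, Bool.and_true, splitSpec]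
          by_cases hc : c = '-'
          · simp only [hc, BEq.rfl, if_true]
            rw [show List.drop (['-'] : List Char).length ('-' :: rest) = rest from by simp]
            rw [ih rest [] (cur.reverse :: acc') (by simp at h ⊢; omega)]
            simp
          · simp only [if_false, hc]
            rw [ih rest (c :: cur) acc' (by simp at h ⊢; omega)]
            simp
            intro h'
            exact absurd h'.symm hc

theorem splitOn_eq (cs : List Char) :
    PySem.Chars.splitOn cs ['-'] = splitSpec cs [] := by
  unfold PySem.Chars.splitOn
  rw [go_eq (cs.length + 1) cs [] [] (by omega)]
  simp

-- '-'-joined picture of A's accumulator string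
def joinSegs (prev : List (List Char)) : List Char :=
  '-' :: prev.flatMap (fun p => p ++ ['-'])

theorem prefix_dash (s p t : List Char) (hs : '-' ∉ s) (hp : '-' ∉ p)
    (h : s ++ ['-'] <+: p ++ '-' :: t) : s = p := by
  induction s generalizing p with
  | nil =>
      cases p with
      | nil => rfl
      | cons d p' =>
          obtain ⟨hp1, hp2⟩ : '-' ≠ d ∧ '-' ∉ p' := by simpa [List.mem_cons, not_or] using hp
          simp only [List.nil_append, List.cons_append, List.cons_prefix_cons] at h
          exact absurd h.1 hp1
  | cons c s' ih =>
      obtain ⟨hs1, hs2⟩ : '-' ≠ c ∧ '-' ∉ s' := by simpa [List.mem_cons, not_or] using hs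
      cases p with
      | nil =>
          simp only [List.cons_append, List.nil_append, List.cons_prefix_cons] at h
          exact absurd h.1.symm hs1
      | cons d p' =>
          obtain ⟨hp1, hp2⟩ : '-' ≠ d ∧ '-' ∉ p' := by simpa [List.mem_cons, not_or] using hp
          simp only [List.cons_append, List.cons_prefix_cons] at h
          rw [h.1, ih p' hs2 hp2 h.2]

theorem infix_skip (p u t : List Char) (hp : '-' ∉ p)
    (h : ('-' :: t) <:+: (p ++ u)) : ('-' :: t) <:+: u := by
  induction p with
  | nil => simpa using h
  | cons a p' ih =>
      simp only [List.cons_append, List.infix_cons_iff] at h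
      rcases h with h | h
      · obtain ⟨hp1, hp2⟩ : '-' ≠ a ∧ '-' ∉ p' := by simpa [List.mem_cons, not_or] using hp
        rcases h with ⟨r, hr⟩
        simp only [List.cons_append, List.cons.injEq] at hr
        exact absurd hr.1 hp1
      · exact ih (by simpa [List.mem_cons, not_or] using hp : ('-' ≠ a ∧ '-' ∉ p')).2 h

theorem sub_iff (prev : List (List Char)) (s : List Char)
    (hprev : ∀ p ∈ prev, '-' ∉ p) (hs : '-' ∉ s) :
    (('-' :: (s ++ ['-'])) <:+: joinSegs prev) ↔ s ∈ prev := by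
  induction prev with
  | nil =>
      simp only [joinSegs, List.flatMap_nil, List.not_mem_nil, iff_false]
      intro h
      have := h.length_le
      simp at this
  | cons p ps ih =>
      have hp : '-' ∉ p := hprev p (by simp)
      have hps : ∀ q ∈ ps, '-' ∉ q := fun q hq => hprev q (by simp [hq])
      constructor
      · intro h
        have hshape : joinSegs (p :: ps) = '-' :: (p ++ joinSegs ps) := by
          simp [joinSegs]
        rw [hshape, List.infix_cons_iff] at h
        rcases h with h | h
        · -- prefix occurrence: s must equal p
          rw [List.cons_prefix_cons] at h
          have : s = p := by
            apply prefix_dash s p (ps.flatMap (fun q => q ++ ['-'])) hs hp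
            simpa [joinSegs] using h.2
          simp [this]
        · -- occurrence inside p ++ joinSegs ps: skip over dash-free p, recurse
          have h2 : ('-' :: (s ++ ['-'])) <:+: joinSegs ps := infix_skip p _ _ hp h
          have := (ih hps).mp h2
          simp [this]
      · intro h
        rcases List.mem_cons.mp h with rfl | h
        · exact ⟨[], ps.flatMap (fun q => q ++ ['-']), by simp [joinSegs]⟩
        · have h2 : ('-' :: (s ++ ['-'])) <:+: joinSegs ps := (ih hps).mpr h
          have hsuf : joinSegs ps <:+ joinSegs (p :: ps) := by
            refine ⟨'-' :: p, ?_⟩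
            simp [joinSegs]
          exact h2.trans hsuf.isInfix

theorem main_inv (cs : List Char) (prev : List (List Char)) (aux : List Char)
    (hprev : ∀ p ∈ prev, '-' ∉ p) (haux : '-' ∉ aux) :
    numRepLoop cs (joinSegs prev) aux = bLoop (segsT cs aux) prev := by
  induction cs generalizing prev aux with
  | nil => simp [numRepLoop, segsT, bLoop]
  | cons c rest ih =>
      by_cases hc : c = '-'
      · subst hc
        simp only [numRepLoop, segsT, bLoop, if_true, ne_eq, not_true_eq_false, if_false]
        by_cases hmem : aux ∈ prev
        · have : PySem.Chars.isIn ('-' :: (aux ++ ['-'])) (joinSegs prev) = true := by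
            rw [PySem.Chars.isIn_iff_infix]
            exact (sub_iff prev aux hprev haux).mpr hmem
          rw [this]
          have hcont : PySem.Set.contains prev aux = true := by
            simp [PySem.Set.contains]
            exact hmem
          rw [hcont]
          simp
        · have : PySem.Chars.isIn ('-' :: (aux ++ ['-'])) (joinSegs prev) = false := by
            rw [PySem.Chars.isIn_eq_false_iff]
            intro h
            exact hmem ((sub_iff prev aux hprev haux).mp h)
          rw [this]
          have hcont : PySem.Set.contains prev aux = false := by
            simp [PySem.Set.contains]
            exact hmem
          simp only [hcont, Bool.false_eq_true, if_false]
          have hadd : PySem.Set.add prev aux = prev ++ [aux] := by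
            simp [PySem.Set.add, PySem.Set.contains, hmem]
          have hjoin : joinSegs prev ++ aux ++ ['-'] = joinSegs (prev ++ [aux]) := by
            simp [joinSegs, List.flatMap_append]
          rw [hjoin, hadd, ih (prev ++ [aux]) []
            (by intro p hp; rcases List.mem_append.mp hp with h | h
                · exact hprev p h
                · simp at h; subst h; exact haux)
            (by simp)]
      · simp only [numRepLoop, segsT, hc, if_false, ne_eq, not_false_eq_true, if_true]
        exact ih prev (aux ++ [c]) hprev
          (by intro hmem'; rcases List.mem_append.mp hmem' with h | h
              · exact haux h
              · simp at h; exact hc h.symm)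

-- ===== VERDICT (by name: the statement is the Claim_ definition above) =====
theorem num_repetidos_spec : Claim_equal_num_repetidos := by
  intro linea _
  unfold Spec_num_repetidos num_repetidos num_repetidos_alt
  rw [PySem.List.slice_to_neg_one, splitOn_eq, dropLast_splitSpec]
  have h0 : joinSegs [] = ['-'] := by simp [joinSegs]
  rw [← h0, main_inv linea.toList [] [] (by simp) (by simp)]
  rfl
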